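-- pv_equiv track=rewrite | github.com/rezardes/NLIDBSpasial | main2.py | getElmtConds
-- ===== SOURCE A (Python) =====
-- def getElmtConds(conds):
--
--     indices = []
--
--     for i in range(0, len(conds)):
--         if (conds[i]=="AND"):
--             indices.append(i-1)
--         elif (i==len(conds)-1):
--             indices.append(i)
--
--     return indices
-- ===== SOURCE B (Python) =====
-- def getElmtConds(conds):
--     # Run-length pass: lengths of the maximal runs of non-"AND" tokens
--     # (one entry per gap, so len(runs) == number of "AND"s + 1).
--     runs = [0]
--     for c in conds:
--         if c == "AND":
--             runs.append(0)
--         else: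
--             runs[-1] += 1
--     # Prefix-sum pass: the k-th "AND" sits right after the k-th run,
--     # so each run length advances pos past that run and its "AND".
--     out = []
--     pos = -1
--     for r in runs[:-1]:
--         pos += r + 1
--         out.append(pos - 1)
--     # A trailing non-empty run means the last token is not "AND".
--     if runs[-1] > 0:
--         out.append(len(conds) - 1)
--     return out
-- ===== Notes on version B (the rewrite author's own statement) =====
-- stated objective: alternative
-- what changed: Replaces A's index scan with per-element if/elif by a run-length encoding of the maximal non-'AND' runs followed by a prefix-sum pass that reconstructs the index before each 'AND', with the trailing run's emptiness deciding the final index.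
import Mathlib
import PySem

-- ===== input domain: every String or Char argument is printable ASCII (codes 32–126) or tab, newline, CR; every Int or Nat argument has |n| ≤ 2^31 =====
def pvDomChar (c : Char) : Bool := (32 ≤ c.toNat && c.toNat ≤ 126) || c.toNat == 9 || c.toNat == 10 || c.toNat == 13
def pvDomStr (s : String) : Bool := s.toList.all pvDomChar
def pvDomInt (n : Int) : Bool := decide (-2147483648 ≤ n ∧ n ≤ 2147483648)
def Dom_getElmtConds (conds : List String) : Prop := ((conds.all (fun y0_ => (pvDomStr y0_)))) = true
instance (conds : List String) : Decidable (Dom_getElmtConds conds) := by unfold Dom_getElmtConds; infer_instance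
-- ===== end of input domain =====

-- B replaces A's index scan with a run-length encoding of the non-"AND" runs plus a prefix-sum pass (objective: alternative).

-- ===== PORT A =====
def getElmtConds (conds : List String) : List Int :=
  (PySem.List.pyRange 0 (conds.length : Int) 1).foldl
    (fun indices i =>
      if PySem.List.pyGetD conds i "" = "AND" then indices ++ [i - 1]
      else if i = (conds.length : Int) - 1 then indices ++ [i]
      else indices) []

-- ===== PORT B =====
-- runs[-1] += 1 on the (always nonempty) runs list
def pvIncLast : List Int → List Int
  | [] => []
  | [x] => [x + 1]
  | x :: y :: t => x :: pvIncLast (y :: t)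

def getElmtConds_alt (conds : List String) : List Int :=
  let runs := conds.foldl
    (fun rs c => if c = "AND" then rs ++ [(0 : Int)] else pvIncLast rs) [(0 : Int)]
  let st := runs.dropLast.foldl
    (fun (st : Int × List Int) r => (st.1 + r + 1, st.2 ++ [st.1 + r + 1 - 1]))
    ((-1 : Int), ([] : List Int))
  -- runs[-1]: runs is never empty (it starts as [0] and only grows or keeps its length)
  if 0 < runs.getLast?.getD 0 then st.2 ++ [(conds.length : Int) - 1] else st.2

-- ===== PRECONDITION & SPEC =====
def Spec_getElmtConds (conds : List String) (out : List Int) : Prop := out = getElmtConds_alt conds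
instance (conds : List String) (out : List Int) : Decidable (Spec_getElmtConds conds out) := by unfold Spec_getElmtConds; infer_instance

-- ===== CLAIM (what is proved, stated in full; the proofs are below) =====
def Claim_equal_getElmtConds : Prop := ∀ (conds : List String), Dom_getElmtConds conds → Spec_getElmtConds conds (getElmtConds conds)

-- ===== LEMMAS AND PROOFS =====

-- the common closed form: index-before-each-"AND"
def pvF (conds : List String) : List Int :=
  (PySem.List.enumerate conds 0).filterMap
    (fun p => if p.2 = "AND" then some (p.1 - 1) else none)

-- recursive characterisation of B's runs list
def pvRuns : Int → List String → List Int
  | k, [] => [k]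
  | k, c :: t => if c = "AND" then k :: pvRuns 0 t else pvRuns (k + 1) t

theorem pvRuns_ne_nil : ∀ (k : Int) (xs : List String), pvRuns k xs ≠ []
  | _, [] => by simp [pvRuns]
  | k, c :: t => by
      by_cases hc : c = "AND" <;> simp [pvRuns, hc, pvRuns_ne_nil (k + 1) t]

theorem pvIncLast_append : ∀ (rs : List Int) (k : Int), pvIncLast (rs ++ [k]) = rs ++ [k + 1]
  | [], k => by simp [pvIncLast]
  | x :: rs, k => by
      rcases rs with _ | ⟨y, rs⟩
      · simp [pvIncLast]
      · simpa [pvIncLast] using pvIncLast_append (y :: rs) k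

theorem runs_eq_pvRuns : ∀ (xs : List String) (rs : List Int) (k : Int),
    xs.foldl (fun rs c => if c = "AND" then rs ++ [(0 : Int)] else pvIncLast rs) (rs ++ [k])
      = rs ++ pvRuns k xs := by
  intro xs
  induction xs with
  | nil => intro rs k; simp [pvRuns]
  | cons c t ih =>
    intro rs k
    simp only [List.foldl_cons]
    by_cases hc : c = "AND"
    · rw [if_pos hc]
      have h2 := ih (rs ++ [k]) 0
      simp only [List.append_assoc] at h2
      simpa [pvRuns, hc] using h2
    · rw [if_neg hc, pvIncLast_append, ih rs (k + 1)]
      simp [pvRuns, hc]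

theorem phase2 : ∀ (xs : List String) (k pos : Int) (out : List Int) (s : Int),
    s = pos + k + 1 →
    ((pvRuns k xs).dropLast.foldl
        (fun (st : Int × List Int) r => (st.1 + r + 1, st.2 ++ [st.1 + r + 1 - 1]))
        (pos, out)).2
      = out ++ (PySem.List.enumerate xs s).filterMap
          (fun p => if p.2 = "AND" then some (p.1 - 1) else none) := by
  intro xs
  induction xs with
  | nil => intro k pos out s hs; simp [pvRuns, PySem.List.enumerate_nil]
  | cons c t ih =>
    intro k pos out s hs
    by_cases hc : c = "AND"
    · rw [show pvRuns k (c :: t) = k :: pvRuns 0 t by simp [pvRuns, hc],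
          List.dropLast_cons_of_ne_nil (pvRuns_ne_nil 0 t), List.foldl_cons,
          ih 0 (pos + k + 1) (out ++ [pos + k + 1 - 1]) (s + 1) (by omega)]
      rw [PySem.List.enumerate_cons]
      simp only [List.filterMap_cons, hc]
      rw [show s - 1 = pos + k + 1 - 1 by omega]
      simp [List.append_assoc]
    · rw [show pvRuns k (c :: t) = pvRuns (k + 1) t by simp [pvRuns, hc],
          ih (k + 1) pos out (s + 1) (by omega), PySem.List.enumerate_cons]
      simp [hc]

theorem pvRuns_last_pos : ∀ (xs : List String) (k : Int), 0 ≤ k →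
    (0 < (pvRuns k xs).getLast?.getD 0 ↔
      (xs ≠ [] ∧ xs.getLast? ≠ some "AND") ∨ (xs = [] ∧ 0 < k)) := by
  intro xs
  induction xs with
  | nil => intro k hk; simp [pvRuns]
  | cons c t ih =>
    intro k hk
    by_cases hc : c = "AND"
    · rw [show pvRuns k (c :: t) = k :: pvRuns 0 t by simp [pvRuns, hc]]
      obtain ⟨y, L, hL⟩ : ∃ y L, pvRuns 0 t = y :: L := by
        rcases h : pvRuns 0 t with _ | ⟨y, L⟩
        · exact absurd h (pvRuns_ne_nil 0 t)
        · exact ⟨y, L, rfl⟩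
      rw [hL, List.getLast?_cons_cons]
      have := ih 0 le_rfl
      rw [hL] at this
      rcases t with _ | ⟨d, t'⟩
      · simp only [pvRuns, List.cons.injEq] at hL
        obtain ⟨hy, hL'⟩ := hL
        simp [hc, ← hy, ← hL']
      · rw [this]
        simp [hc, List.getLast?_cons_cons]
    · rw [show pvRuns k (c :: t) = pvRuns (k + 1) t by simp [pvRuns, hc],
          ih (k + 1) (by omega)]
      rcases t with _ | ⟨d, t'⟩
      · simp [hc]; omega
      · simp [List.getLast?_cons_cons]

-- A's loop (as a fold over enumerate) equals the closed form plus the final-index guard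
theorem getElmtConds_key (xs : List String) (N : Int) : ∀ (s : Int) (acc : List Int),
    s + (xs.length : Int) = N →
    (PySem.List.enumerate xs s).foldl
      (fun acc p => if p.2 = "AND" then acc ++ [p.1 - 1]
                    else if p.1 = N - 1 then acc ++ [p.1] else acc) acc
    = acc ++ (PySem.List.enumerate xs s).filterMap
          (fun p => if p.2 = "AND" then some (p.1 - 1) else none)
        ++ (if xs ≠ [] ∧ xs.getLast? ≠ some "AND" then [N - 1] else []) := by
  induction xs with
  | nil => intro s acc h; simp [PySem.List.enumerate_nil]
  | cons x t ih =>
    intro s acc h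
    rw [PySem.List.enumerate_cons]
    simp only [List.foldl_cons, List.filterMap_cons]
    by_cases hx : x = "AND"
    · rw [if_pos hx]
      rcases t with _ | ⟨y, t'⟩
      · simp [PySem.List.enumerate_nil, hx]
      · rw [ih (s + 1) (acc ++ [s - 1])
            (by simp only [List.length_cons] at h ⊢; push_cast at h ⊢; omega)]
        simp [hx, List.getLast?_cons_cons, List.append_assoc]
    · rw [if_neg hx]
      rcases t with _ | ⟨y, t'⟩
      · have hs : s = N - 1 := by
          simp only [List.length_cons, List.length_nil] at h; omega
        rw [if_pos hs]
        simp [PySem.List.enumerate_nil, hx, hs]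
      · have hs : ¬ (s = N - 1) := by
          simp only [List.length_cons] at h; push_cast at h; omega
        rw [if_neg hs, ih (s + 1) acc
            (by simp only [List.length_cons] at h ⊢; push_cast at h ⊢; omega)]
        simp [hx, List.getLast?_cons_cons, List.append_assoc]

theorem getElmtConds_eq_closed (conds : List String) :
    getElmtConds conds
      = pvF conds ++ (if conds ≠ [] ∧ conds.getLast? ≠ some "AND"
                      then [(conds.length : Int) - 1] else []) := by
  unfold getElmtConds pvF
  have he := PySem.List.enumerate_eq_map_pyRange (xs := conds) (d := "")
  calc (PySem.List.pyRange 0 (conds.length : Int) 1).foldl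
        (fun indices i =>
          if PySem.List.pyGetD conds i "" = "AND" then indices ++ [i - 1]
          else if i = (conds.length : Int) - 1 then indices ++ [i]
          else indices) []
      = (PySem.List.enumerate conds 0).foldl
        (fun acc p => if p.2 = "AND" then acc ++ [p.1 - 1]
                      else if p.1 = (conds.length : Int) - 1 then acc ++ [p.1] else acc) [] := by
        rw [he, List.foldl_map]
        simp [PySem.List.len_eq]
    _ = _ := by
        rw [getElmtConds_key conds (conds.length : Int) 0 [] (by simp)]
        simp

theorem getElmtConds_alt_eq_closed (conds : List String) :
    getElmtConds_alt conds
      = pvF conds ++ (if conds ≠ [] ∧ conds.getLast? ≠ some "AND"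
                      then [(conds.length : Int) - 1] else []) := by
  unfold getElmtConds_alt
  have hruns : conds.foldl
      (fun rs c => if c = "AND" then rs ++ [(0 : Int)] else pvIncLast rs) [(0 : Int)]
      = pvRuns 0 conds := by
    simpa using runs_eq_pvRuns conds [] 0
  simp only [hruns]
  rw [phase2 conds 0 (-1) [] 0 (by omega)]
  have hpos := pvRuns_last_pos conds 0 le_rfl
  rcases Decidable.em (conds ≠ [] ∧ conds.getLast? ≠ some "AND") with h | h
  · rw [if_pos (hpos.mpr (Or.inl h)), if_pos h]
    simp [pvF]
  · rw [if_neg (by rw [hpos]; rintro (h' | ⟨_, h'⟩); exact h h'; omega), if_neg h]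
    simp [pvF]

-- ===== VERDICT (by name: the statement is the Claim_ definition above) =====
theorem getElmtConds_spec : Claim_equal_getElmtConds := by
  intro conds _
  unfold Spec_getElmtConds
  rw [getElmtConds_eq_closed, getElmtConds_alt_eq_closed]
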